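-- pv_equiv track=rewrite | github.com/raul-arrabales/VANESSA | agent_engine/app/services/runtime_client.py | _coerce_weaviate_class_name
-- ===== SOURCE A (Python) =====
-- from typing import Any
--
-- class VectorStoreRuntimeClientError(RuntimeError):
--     def __init__(self, *, code: str, message: str, status_code: int, details: dict[str, Any] | None = None):
--         super().__init__(message)
--         self.code = code
--         self.message = message
--         self.status_code = status_code
--         self.details = details or {}
--
-- def _coerce_weaviate_class_name(index_name: str) -> str:
--     parts = [segment for segment in "".join(ch if ch.isalnum() else " " for ch in index_name).split() if segment]
--     if not parts:
--         raise VectorStoreRuntimeClientError(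
--             code="invalid_index_name",
--             message="index name must contain letters or numbers",
--             status_code=400,
--         )
--     return "".join(part[:1].upper() + part[1:] for part in parts)
-- ===== SOURCE B (Python) =====
-- from typing import Any
--
-- class VectorStoreRuntimeClientError(RuntimeError):
--     def __init__(self, *, code: str, message: str, status_code: int, details: dict[str, Any] | None = None):
--         super().__init__(message)
--         self.code = code
--         self.message = message
--         self.status_code = status_code
--         self.details = details or {}
--
-- def _coerce_weaviate_class_name(index_name: str) -> str:
--     # Single pass: a non-alphanumeric character marks a word boundary; the
--     # first alphanumeric character after a boundary is uppercased.
--     out: list[str] = []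
--     boundary = True
--     for ch in index_name:
--         if ch.isalnum():
--             out.append(ch.upper() if boundary else ch)
--             boundary = False
--         else:
--             boundary = True
--     if not out:
--         raise VectorStoreRuntimeClientError(
--             code="invalid_index_name",
--             message="index name must contain letters or numbers",
--             status_code=400,
--         )
--     return "".join(out)
-- ===== Notes on version B (the rewrite author's own statement) =====
-- stated objective: alternative
-- what changed: Replaces A's three staged passes (blank out non-alphanumerics into a new string, split it on whitespace, re-join capitalized segments) by one single pass over the characters with a word-boundary flag, building the output directly; Pre_ excludes inputs with no alphanumeric character, on which both A and B raise VectorStoreRuntimeClientError.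
import Mathlib
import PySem

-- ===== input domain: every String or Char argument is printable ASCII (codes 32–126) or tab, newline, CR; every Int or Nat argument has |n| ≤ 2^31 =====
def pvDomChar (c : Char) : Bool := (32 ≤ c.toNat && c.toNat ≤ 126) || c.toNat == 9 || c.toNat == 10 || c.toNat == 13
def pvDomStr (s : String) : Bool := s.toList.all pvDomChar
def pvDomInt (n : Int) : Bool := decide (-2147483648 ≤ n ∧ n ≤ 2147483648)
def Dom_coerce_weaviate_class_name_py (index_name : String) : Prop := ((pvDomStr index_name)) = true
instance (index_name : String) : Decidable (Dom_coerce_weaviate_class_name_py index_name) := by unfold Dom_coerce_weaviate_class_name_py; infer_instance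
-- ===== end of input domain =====

-- B replaces A's staged passes (blank, split, re-join capitalized) by one boundary-flag pass over the characters.


-- ===== PORT A =====
-- ch if ch.isalnum() else " "
def pvBlank (c : Char) : Char := if PySem.Chars.isalnum c then c else ' '

-- part[:1].upper() + part[1:]
def pvCapFirst (p : List Char) : List Char :=
  PySem.Chars.upper (PySem.Chars.slice p none (some 1)) ++ PySem.Chars.slice p (some 1) none

-- Port of A. Where the Python raises (no alphanumeric character: parts == []),
-- excluded by Pre_ below, the port just returns the empty join.
def coerce_weaviate_class_name_py (index_name : String) : String :=
  let blanked := index_name.toList.map pvBlank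
  let parts := (PySem.Chars.split₀ blanked).filter (fun seg => !seg.isEmpty)
  String.ofList (PySem.Chars.join [] (parts.map pvCapFirst))

-- ===== PORT B =====
-- one step of Source B's loop: state = (out, boundary)
def pvStepB (st : List Char × Bool) (ch : Char) : List Char × Bool :=
  if PySem.Chars.isalnum ch then
    (st.1 ++ [if st.2 then PySem.Chars.upperChar ch else ch], false)
  else
    (st.1, true)

-- Port of B. Where the Python raises (out == [], excluded by Pre_) it returns "".
def coerce_weaviate_class_name_py_alt (index_name : String) : String :=
  String.ofList (index_name.toList.foldl pvStepB ([], true)).1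

-- ===== PRECONDITION & SPEC =====
-- Pre_ excludes exactly the inputs with no alphanumeric character, on which the
-- Python A (and B) raise VectorStoreRuntimeClientError instead of returning.
def Pre_coerce_weaviate_class_name_py (index_name : String) : Prop :=
  index_name.toList.any PySem.Chars.isalnum = true
instance (index_name : String) : Decidable (Pre_coerce_weaviate_class_name_py index_name) := by
  unfold Pre_coerce_weaviate_class_name_py; infer_instance

def pvWitness_coerce_weaviate_class_name_py : String := "doc_v2"

def Spec_coerce_weaviate_class_name_py (index_name : String) (out : String) : Prop :=
  out = coerce_weaviate_class_name_py_alt index_name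
instance (index_name : String) (out : String) : Decidable (Spec_coerce_weaviate_class_name_py index_name out) := by
  unfold Spec_coerce_weaviate_class_name_py; infer_instance

-- ===== CLAIM =====
def Claim_equal_coerce_weaviate_class_name_py : Prop :=
  ∀ (index_name : String), Dom_coerce_weaviate_class_name_py index_name →
    Pre_coerce_weaviate_class_name_py index_name →
    Spec_coerce_weaviate_class_name_py index_name (coerce_weaviate_class_name_py index_name)

-- ===== LEMMAS AND PROOFS =====

-- recursion that B's foldl unrolls to (proof helper only)
def pvFB : List Char → Bool → List Char
  | [], _ => []
  | c :: cs, b =>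
    if PySem.Chars.isalnum c then
      (if b then [PySem.Chars.upperChar c] else [c]) ++ pvFB cs false
    else
      pvFB cs true

lemma pvFoldB_eq (cs : List Char) : ∀ (acc : List Char) (b : Bool),
    (cs.foldl pvStepB (acc, b)).1 = acc ++ pvFB cs b := by
  induction cs with
  | nil => intro acc b; simp [pvFB]
  | cons c cs ih =>
    intro acc b
    by_cases h : PySem.Chars.isalnum c
    · simp [pvStepB, pvFB, h, ih]
      split <;> simp
    · simp [pvStepB, pvFB, h, ih]

lemma pvIsalnum_not_isspace (c : Char) (h : PySem.Chars.isalnum c = true) :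
    PySem.Chars.isspace c = false := by
  simp only [PySem.Chars.isalnum, PySem.Chars.isalpha, PySem.Chars.isdigit, PySem.Chars.isspace,
    PySem.Chars.isupper, PySem.Chars.islower, Char.le_def, UInt32.le_iff_toNat_le, Bool.or_eq_true,
    Bool.and_eq_true, decide_eq_true_eq, Bool.or_eq_false_iff, Bool.and_eq_false_iff,
    decide_eq_false_iff_not, show 'A'.val.toNat = 65 from rfl, show 'Z'.val.toNat = 90 from rfl,
    show 'a'.val.toNat = 97 from rfl, show 'z'.val.toNat = 122 from rfl,
    show '0'.val.toNat = 48 from rfl, show '9'.val.toNat = 57 from rfl, Char.toNat] at *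
  omega

lemma pvJoin_nil_flatten (l : List (List Char)) : PySem.Chars.join [] l = l.flatten := by
  induction l with
  | nil => rfl
  | cons x xs ih =>
    cases xs with
    | nil => simp [PySem.Chars.join, List.intercalate]
    | cons y ys =>
      rw [PySem.Chars.join_cons_cons]
      simpa using congrArg (x ++ ·) ih

lemma pvCapFirst_nil : pvCapFirst [] = [] := by
  simp [pvCapFirst, PySem.Chars.upper, PySem.List.slice, PySem.List.clampIdx]

lemma pvCapFirst_cons (x : Char) (xs : List Char) :
    pvCapFirst (x :: xs) = PySem.Chars.upperChar x :: xs := by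
  simp [pvCapFirst, PySem.Chars.upper, PySem.List.slice, PySem.List.clampIdx]

lemma pvCapFirst_append (xs ys : List Char) (h : xs ≠ []) :
    pvCapFirst (xs ++ ys) = pvCapFirst xs ++ ys := by
  cases xs with
  | nil => exact absurd rfl h
  | cons x xt => simp [pvCapFirst_cons]

-- the capitalized words streamed out of split₀.go equal the single-pass output
lemma pvGo_eq (cs : List Char) : ∀ (cur : List Char) (acc : List (List Char)),
    ((((PySem.Chars.split₀.go (cs.map pvBlank) cur acc).filter (fun seg => !seg.isEmpty)).map pvCapFirst)).flatten
      = (((acc.reverse.filter (fun seg => !seg.isEmpty)).map pvCapFirst)).flatten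
        ++ pvCapFirst cur.reverse ++ pvFB cs cur.isEmpty := by
  induction cs with
  | nil =>
    intro cur acc
    cases cur with
    | nil => simp [PySem.Chars.split₀.go, pvFB, pvCapFirst_nil]
    | cons c ct =>
      simp [PySem.Chars.split₀.go, pvFB, List.filter_append]
  | cons c cs ih =>
    intro cur acc
    by_cases h : PySem.Chars.isalnum c
    · have hb : pvBlank c = c := by simp [pvBlank, h]
      have hs : PySem.Chars.isspace c = false := pvIsalnum_not_isspace c h
      rw [List.map_cons, hb]
      rw [show PySem.Chars.split₀.go (c :: cs.map pvBlank) cur acc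
            = PySem.Chars.split₀.go (cs.map pvBlank) (c :: cur) acc by
        simp [PySem.Chars.split₀.go, hs]]
      rw [ih (c :: cur) acc]
      cases cur with
      | nil => simp [pvFB, h, pvCapFirst_nil, pvCapFirst_cons]
      | cons d dt =>
        have hc : pvCapFirst (dt.reverse ++ [d, c]) = pvCapFirst (dt.reverse ++ [d]) ++ [c] := by
          rw [show dt.reverse ++ [d, c] = (dt.reverse ++ [d]) ++ [c] by simp]
          exact pvCapFirst_append _ [c] (by simp)
        simp [pvFB, h, hc]
    · have hb : pvBlank c = ' ' := by simp [pvBlank, h]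
      have hs : PySem.Chars.isspace ' ' = true := rfl
      rw [List.map_cons, hb]
      cases cur with
      | nil =>
        rw [show PySem.Chars.split₀.go (' ' :: cs.map pvBlank) [] acc
              = PySem.Chars.split₀.go (cs.map pvBlank) [] acc by
          simp [PySem.Chars.split₀.go, hs]]
        rw [ih [] acc]
        simp [pvFB, h]
      | cons d dt =>
        rw [show PySem.Chars.split₀.go (' ' :: cs.map pvBlank) (d :: dt) acc
              = PySem.Chars.split₀.go (cs.map pvBlank) [] ((d :: dt).reverse :: acc) by
          simp [PySem.Chars.split₀.go, hs]]
        rw [ih [] ((d :: dt).reverse :: acc)]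
        simp [pvFB, h, pvCapFirst_nil, List.filter_append]

-- ===== VERDICT =====
theorem coerce_weaviate_class_name_py_spec : Claim_equal_coerce_weaviate_class_name_py := by
  intro s _ _
  unfold Spec_coerce_weaviate_class_name_py coerce_weaviate_class_name_py coerce_weaviate_class_name_py_alt
  apply congrArg String.ofList
  rw [pvFoldB_eq, pvJoin_nil_flatten]
  have := pvGo_eq s.toList [] []
  simpa [PySem.Chars.split₀, pvCapFirst_nil] using this
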